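-- pv_equiv track=rewrite | github.com/lolsZz/node-DeepResearch | knowledge/optimise.py | create_file_map
-- ===== SOURCE A (Python) =====
-- from typing import List, Dict
--
-- def create_file_map(combined_content: str) -> Dict[str, str]:
--     """
--     Parses the combined content string and creates a dictionary mapping
--     file paths to their contents.
--     """
--     file_map = {}
--     current_file = None
--     current_content = []
--
--     lines = combined_content.split('\n')
--     for line in lines:
--         if line.startswith('=====') and "File: " in line:
--             # Save previous file content
--             if current_file is not None:
--                 file_map[current_file] = "\n".join(current_content)
--
--             # Start a new file
--             current_file = line.split("File: ")[1].split("\n")[0].strip()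
--             current_content = []
--         elif current_file is not None:
--             # Accumulate content lines
--             current_content.append(line)
--
--     # Save the last file
--     if current_file is not None:
--         file_map[current_file] = "\n".join(current_content)
--
--     return file_map
-- ===== SOURCE B (Python) =====
-- def create_file_map(combined_content):
--     """
--     Parses the combined content string and creates a dictionary mapping
--     file paths to their contents (index-then-slice: find all header lines
--     first, then slice the content between consecutive headers).
--     """
--     lines = combined_content.split('\n')
--     headers = [(i, line.split("File: ")[1].split("\n")[0].strip())
--                for i, line in enumerate(lines)
--                if line.startswith('=====') and "File: " in line]
--     file_map = {}
--     for k, (i, name) in enumerate(headers):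
--         end = headers[k + 1][0] if k + 1 < len(headers) else len(lines)
--         file_map[name] = "\n".join(lines[i + 1:end])
--     return file_map
-- ===== Notes on version B (the rewrite author's own statement) =====
-- stated objective: alternative
-- what changed: Replaces the flush-on-boundary accumulator (dict + current_file + growing content list) with two passes: first collect (index, filename) for every header line, then slice the lines strictly between consecutive headers and assign each slice into the map.
import Mathlib
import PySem

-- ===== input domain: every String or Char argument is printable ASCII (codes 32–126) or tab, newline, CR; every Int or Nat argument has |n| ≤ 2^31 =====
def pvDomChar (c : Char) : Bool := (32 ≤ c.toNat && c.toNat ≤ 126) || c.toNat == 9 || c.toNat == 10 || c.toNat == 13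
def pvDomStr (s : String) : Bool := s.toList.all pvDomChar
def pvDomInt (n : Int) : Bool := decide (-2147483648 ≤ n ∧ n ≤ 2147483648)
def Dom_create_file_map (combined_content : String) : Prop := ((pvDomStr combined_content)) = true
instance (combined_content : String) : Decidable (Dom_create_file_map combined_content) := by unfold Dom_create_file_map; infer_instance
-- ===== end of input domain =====

-- B replaces A's flush-on-boundary accumulator with an index-headers-then-slice two-pass
-- decomposition; same cost, same return value everywhere (A is total).

-- ===== PORT A =====
-- shared by both ports (both Pythons contain the identical header test / filename extraction)
-- line.startswith('=====') and "File: " in line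
def pvIsHeader (line : String) : Bool :=
  PySem.Str.startswith line "=====" && PySem.Str.isIn "File: " line

-- line.split("File: ")[1].split("\n")[0].strip()  (split? is exact: both separators are
-- non-empty; the [1]/[0] indices exist whenever pvIsHeader holds, which guards every use
-- in both Pythons, so pyGetD's default is never taken there)
def pvFname (line : String) : String :=
  PySem.Str.strip (PySem.List.pyGetD
    ((PySem.Str.split? (PySem.List.pyGetD ((PySem.Str.split? line "File: ").getD []) 1 "") "\n").getD []) 0 "")

-- one iteration of A's for-loop over (file_map, current_file, current_content)
def aStep (st : PySem.Dict String String × Option String × List String) (line : String) :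
    PySem.Dict String String × Option String × List String :=
  match st with
  | (fm, cf, cc) =>
    if pvIsHeader line then
      ((match cf with
        | none => fm
        | some f => fm.insert f (PySem.Str.join "\n" cc)), some (pvFname line), [])
    else match cf with
      | none => (fm, cf, cc)
      | some _ => (fm, cf, cc ++ [line])

-- the final 'save the last file'
def aFin (st : PySem.Dict String String × Option String × List String) : PySem.Dict String String :=
  match st with
  | (fm, none, _) => fm
  | (fm, some f, cc) => fm.insert f (PySem.Str.join "\n" cc)

def create_file_map (combined_content : String) : List (String × String) :=
  (aFin ((((PySem.Str.split? combined_content "\n").getD []) : List String).foldl aStep (PySem.Dict.empty, none, []))).items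

-- ===== PORT B =====
-- headers = [(i, fname(line)) for i, line in enumerate(lines) if isHeader(line)]
def bHeaders (lines : List String) : List (Int × String) :=
  ((PySem.List.enumerate lines 0).filter (fun p => pvIsHeader p.2)).map (fun p => (p.1, pvFname p.2))

-- for k, (i, name) in enumerate(headers):
--   end = headers[k+1][0] if k+1 < len(headers) else len(lines)
--   file_map[name] = "\n".join(lines[i+1:end])
-- (the k / headers[k+1] peek at the next entry is transcribed as recursion peeking at rest's head)
def bAssign (lines : List String) : List (Int × String) → PySem.Dict String String → PySem.Dict String String
  | [], fm => fm
  | (i, name) :: rest, fm =>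
    let e : Int := match rest with | [] => (lines.length : Int) | (j, _) :: _ => j
    bAssign lines rest (fm.insert name (PySem.Str.join "\n" (PySem.List.slice lines (some (i + 1)) (some e))))

def create_file_map_alt (combined_content : String) : List (String × String) :=
  (bAssign ((PySem.Str.split? combined_content "\n").getD []) (bHeaders ((PySem.Str.split? combined_content "\n").getD [])) PySem.Dict.empty).items

-- ===== PRECONDITION & SPEC =====
def Spec_create_file_map (combined_content : String) (out : List (String × String)) : Prop := out = create_file_map_alt combined_content
instance (combined_content : String) (out : List (String × String)) : Decidable (Spec_create_file_map combined_content out) := by unfold Spec_create_file_map; infer_instance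

-- ===== CLAIM (what is proved, stated in full; the proofs are below) =====
def Claim_equal_create_file_map : Prop := ∀ (combined_content : String), Dom_create_file_map combined_content → Spec_create_file_map combined_content (create_file_map combined_content)

-- ===== LEMMAS AND PROOFS =====

-- proof-only abbreviation for the negated header predicate
def pvQ (x : String) : Bool := !pvIsHeader x

-- the common content structure: (filename, content lines) chunks in order
def chunks : List String → List (String × List String)
  | [] => []
  | l :: ls =>
    if pvIsHeader l then
      (pvFname l, ls.takeWhile pvQ) :: chunks (ls.dropWhile pvQ)
    else chunks ls
termination_by ls => ls.length
decreasing_by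
  all_goals simp_all
  have := List.length_dropWhile_le pvQ ls; omega

theorem chunks_nil : chunks [] = [] := by rw [chunks.eq_def]

theorem chunks_cons_header {l : String} (ls : List String) (h : pvIsHeader l = true) :
    chunks (l :: ls) = (pvFname l, ls.takeWhile pvQ) :: chunks (ls.dropWhile pvQ) := by
  rw [chunks.eq_def]; simp [h]

theorem chunks_cons_nonheader {l : String} (ls : List String) (h : pvIsHeader l = false) :
    chunks (l :: ls) = chunks ls := by
  rw [chunks.eq_def]; simp [h]

def foldIns (fm : PySem.Dict String String) (cs : List (String × List String)) : PySem.Dict String String :=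
  cs.foldl (fun fm c => fm.insert c.1 (PySem.Str.join "\n" c.2)) fm

-- hdrs ls i = header indices/names of ls, indices offset by i
def hdrs : List String → Nat → List (Int × String)
  | [], _ => []
  | l :: ls, i => if pvIsHeader l then ((i : Int), pvFname l) :: hdrs ls (i + 1) else hdrs ls (i + 1)

theorem bHeaders_eq_hdrs (ls : List String) (i : Nat) :
    ((PySem.List.enumerate ls (i : Int)).filter (fun p => pvIsHeader p.2)).map (fun p => (p.1, pvFname p.2)) = hdrs ls i := by
  induction ls generalizing i with
  | nil => simp [hdrs, PySem.List.enumerate_nil]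
  | cons l ls ih =>
    rw [PySem.List.enumerate_cons]
    by_cases h : pvIsHeader l = true
    · simp [hdrs, h, ← ih (i + 1)]
    · simp [hdrs, h, ← ih (i + 1)]

theorem hdrs_skip (ls : List String) (i : Nat) :
    hdrs ls i = hdrs (ls.dropWhile pvQ) (i + (ls.takeWhile pvQ).length) := by
  induction ls generalizing i with
  | nil => rfl
  | cons l ls ih =>
    by_cases h : pvIsHeader l = true
    · simp [pvQ, h]
    · simp [pvQ, h, hdrs, ih (i + 1)]
      congr 1; omega

-- A's loop, from an open-file state
theorem aLoop_some (ls : List String) (fm : PySem.Dict String String) (f : String) (cc : List String) :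
    aFin (ls.foldl aStep (fm, some f, cc)) =
      foldIns (fm.insert f (PySem.Str.join "\n" (cc ++ ls.takeWhile pvQ))) (chunks (ls.dropWhile pvQ)) := by
  induction ls generalizing fm f cc with
  | nil => simp [aFin, foldIns, chunks]
  | cons l ls ih =>
    by_cases h : pvIsHeader l = true
    · have hq : pvQ l = false := by simp [pvQ, h]
      simp only [List.foldl_cons]
      rw [show aStep (fm, some f, cc) l = ((fm.insert f (PySem.Str.join "\n" cc)), some (pvFname l), []) from by simp [aStep, h]]
      rw [ih]
      simp only [List.takeWhile_cons, List.dropWhile_cons, hq, Bool.false_eq_true, if_false]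
      rw [chunks_cons_header ls h]
      simp [foldIns]
    · rw [Bool.not_eq_true] at h
      have hq : pvQ l = true := by simp [pvQ, h]
      simp only [List.foldl_cons]
      rw [show aStep (fm, some f, cc) l = (fm, some f, cc ++ [l]) from by simp [aStep, h]]
      rw [ih]
      simp only [List.takeWhile_cons, List.dropWhile_cons, hq, if_true]
      simp

-- A's loop, from the initial no-file state
theorem aLoop_none (ls : List String) (fm : PySem.Dict String String) (cc : List String) :
    aFin (ls.foldl aStep (fm, none, cc)) = foldIns fm (chunks ls) := by
  induction ls generalizing cc with
  | nil => simp [aFin, foldIns, chunks]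
  | cons l ls ih =>
    by_cases h : pvIsHeader l = true
    · simp only [List.foldl_cons]
      rw [show aStep (fm, none, cc) l = (fm, some (pvFname l), []) from by simp [aStep, h]]
      rw [aLoop_some, chunks_cons_header ls h]
      simp [foldIns]
    · rw [Bool.not_eq_true] at h
      simp only [List.foldl_cons]
      rw [show aStep (fm, none, cc) l = (fm, none, cc) from by simp [aStep, h]]
      rw [chunks_cons_nonheader ls h]
      exact ih cc

-- B's assignment pass computes the same fold over chunks (fueled strong induction:
-- the chunk recursion jumps to dropWhile)
theorem bAssign_eq_aux (n : Nat) : ∀ (lines ls : List String) (i : Nat) (fm : PySem.Dict String String),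
    ls.length ≤ n → i ≤ lines.length → lines.drop i = ls →
    bAssign lines (hdrs ls i) fm = foldIns fm (chunks ls) := by
  induction n with
  | zero =>
    intro lines ls i fm hlen _ _
    have : ls = [] := List.length_eq_zero_iff.mp (Nat.le_zero.mp hlen)
    subst this; simp [hdrs, bAssign, chunks_nil, foldIns]
  | succ n ih =>
    intro lines ls i fm hlen hi hd
    match ls, hd with
    | [], _ => simp [hdrs, bAssign, chunks_nil, foldIns]
    | l :: ls', hd =>
      have hlines : lines.length = i + ls'.length + 1 := by
        have := List.length_drop (i := i) (l := lines)
        rw [hd] at this; simp at this; omega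
      have hd' : lines.drop (i + 1) = ls' := by
        have : lines.drop (i + 1) = (lines.drop i).drop 1 := by
          rw [List.drop_drop]
        rw [this, hd]; rfl
      by_cases h : pvIsHeader l = true
      · -- header line: one bAssign step consumes it
        set t := ls'.takeWhile pvQ with ht
        set d := ls'.dropWhile pvQ with hdw
        have htd : t ++ d = ls' := List.takeWhile_append_dropWhile
        have htle : t.length ≤ ls'.length := by
          have := congrArg List.length htd; simp at this; omega
        have hdropi' : lines.drop (i + 1 + t.length) = d := by
          rw [← List.drop_drop, hd', ← htd, List.drop_left]
        have hskip : hdrs ls' (i + 1) = hdrs d (i + 1 + t.length) := hdrs_skip ls' (i + 1)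
        have hdlen : d.length ≤ n := by
          have h1 : d.length ≤ ls'.length := by
            rw [hdw]; exact List.length_dropWhile_le pvQ ls'
          simp [List.length_cons] at hlen; omega
        have htake : ls'.take t.length = t :=
          (List.prefix_iff_eq_take.mp (List.takeWhile_prefix pvQ)).symm
        rw [chunks_cons_header ls' h]
        simp only [hdrs, h, if_pos]
        rw [bAssign.eq_def, hskip]
        simp only []
        have hslice : ∀ e : Int,
            (e = (match hdrs d (i + 1 + t.length) with
                  | [] => (lines.length : Int) | (j, _) :: _ => j)) →
            PySem.List.slice lines (some ((i : Int) + 1)) (some e) = t := by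
          intro e he
          match hdmatch : d, hdropi', hskip with
          | [], hdropi', hskip =>
            -- no further header: slice to end of lines, and t = ls'
            have ht' : t = ls' := by rw [← htd]; simp
            rw [hdrs] at he
            simp only [he]
            have : ((i : Int) + 1) = ((i + 1 : Nat) : Int) := by push_cast; ring
            rw [this, PySem.List.slice_natCast]
            rw [hd', ht']
            have : lines.length - (i + 1) = ls'.length := by omega
            rw [this, List.take_of_length_le (by omega)]
          | hh :: r, hdropi', hskip =>
            -- next header at absolute index i+1+t.length
            have hhh : pvIsHeader hh = true := by
              have hne : ls'.dropWhile pvQ ≠ [] := by rw [← hdw]; simp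
              have h0 := List.head_dropWhile_not pvQ hne
              have h1 : (ls'.dropWhile pvQ).head hne = hh := by simp [← hdw]
              rw [h1] at h0
              simpa [pvQ] using h0
            rw [hdrs, if_pos hhh] at he
            simp only [he]
            have : ((i : Int) + 1) = ((i + 1 : Nat) : Int) := by push_cast; ring
            rw [this, PySem.List.slice_natCast, hd']
            have : i + 1 + t.length - (i + 1) = t.length := by omega
            rw [this, htake]
        rw [hslice _ rfl]
        rw [ih lines d (i + 1 + t.length) _ hdlen (by omega) hdropi']
        simp [foldIns, ← ht, ← hdw]
      · -- non-header line: skipped by both sides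
        rw [Bool.not_eq_true] at h
        rw [chunks_cons_nonheader ls' h]
        simp only [hdrs, h, Bool.false_eq_true, if_false]
        exact ih lines ls' (i + 1) fm (by simp [List.length_cons] at hlen; omega) (by omega) hd'

theorem create_file_map_spec' (s : String) : create_file_map s = create_file_map_alt s := by
  unfold create_file_map create_file_map_alt
  congr 1
  rw [aLoop_none]
  rw [show bHeaders ((PySem.Str.split? s "\n").getD []) = hdrs ((PySem.Str.split? s "\n").getD []) 0 from by
    unfold bHeaders; rw [show (0 : Int) = ((0 : Nat) : Int) from rfl]; exact bHeaders_eq_hdrs _ 0]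
  rw [bAssign_eq_aux (((PySem.Str.split? s "\n").getD []).length) _ _ 0 _ (le_refl _) (Nat.zero_le _) List.drop_zero]

-- ===== VERDICT (by name: the statement is the Claim_ definition above) =====
theorem create_file_map_spec : Claim_equal_create_file_map := by
  intro s _
  exact create_file_map_spec' s
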